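-- pv_equiv track=rewrite | github.com/JeanEdouardMonnerville/Mod-lisationDuneParticuleDansUnChampsDeForce | Particules dans un champs de force.py | convertisseur_matrice
-- ===== SOURCE A (Python) =====
-- def convertisseur_matrice(Matrice,position):
--     n=len(Matrice)
--     #on definit le centre du plan
--     O=[(n//2),(n//2)]
--
--     #coordonnee sur l'axe des absisses
--     x=0
--     if position[1]>O[0]:
--         while position[1]!=O[0]:
--             position[1]=position[1]-1
--             x=x+1
--
--     elif position[1]<O[0]:
--         while position[1]!=O[0]:
--             position[1]=position[1]+1
--             x=x+1
--         x=x*(-1)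
--
--     #coordonnee sur l'axe des ordonnees
--     y=0
--     if position[0]>O[1]:
--         while position[0]!=O[1]:
--             position[0]=position[0]-1
--             y=y+1
--
--     elif position[0]<O[1]:
--         while position[0]!=O[1]:
--             position[0]=position[0]+1
--             y=y+1
--
--         y=y*(-1)
--
--     return(x,y)
-- ===== SOURCE B (Python) =====
-- def convertisseur_matrice(Matrice, position):
--     # O(1) closed form; does NOT mutate position (A sets it to the centre)
--     c = len(Matrice) // 2
--     return (position[1] - c, position[0] - c)
-- ===== Notes on version B (the rewrite author's own statement) =====
-- stated objective: faster
-- what changed: Replaces A's step-by-step counting loops (walking position toward the centre one unit at a time) with a direct O(1) subtraction position[i] - len(Matrice)//2; equivalence is about the return value only (A mutates position in place, B does not).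
import Mathlib
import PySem

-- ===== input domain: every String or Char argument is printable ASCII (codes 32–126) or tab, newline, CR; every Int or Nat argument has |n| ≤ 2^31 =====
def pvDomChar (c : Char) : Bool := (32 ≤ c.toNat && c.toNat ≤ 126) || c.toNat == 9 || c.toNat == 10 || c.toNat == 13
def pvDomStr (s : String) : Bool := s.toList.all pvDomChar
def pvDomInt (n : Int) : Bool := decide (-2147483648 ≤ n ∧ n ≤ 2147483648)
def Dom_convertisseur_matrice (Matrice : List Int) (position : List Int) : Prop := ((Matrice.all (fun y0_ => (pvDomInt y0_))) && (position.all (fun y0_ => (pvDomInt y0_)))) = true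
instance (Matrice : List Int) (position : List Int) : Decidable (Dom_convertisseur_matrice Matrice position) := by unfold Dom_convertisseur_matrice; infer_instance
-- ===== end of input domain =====

-- B computes the same pair by a direct O(1) subtraction instead of A's unit-step counting
-- loops; equivalence is about the RETURN value only (Python A mutates position in place, B does not).

-- ===== PORT A =====
-- while p != c: p -= 1; x += 1   (entered only when p > c, so the guard p > c is the
-- reachable reading of p ≠ c and makes the recursion well-founded)
def pvLoopDown (p c x : Int) : Int × Int :=
  if p > c then pvLoopDown (p - 1) c (x + 1) else (p, x)
  termination_by (p - c).toNat
  decreasing_by omega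

-- while p != c: p += 1; x += 1   (entered only when p < c)
def pvLoopUp (p c x : Int) : Int × Int :=
  if p < c then pvLoopUp (p + 1) c (x + 1) else (p, x)
  termination_by (c - p).toNat
  decreasing_by omega

def convertisseur_matrice (Matrice : List Int) (position : List Int) : List Int :=
  let n : Int := Matrice.length
  let O : List Int := [PySem.Int.floordiv n 2, PySem.Int.floordiv n 2]
  -- position[1], position[0]: Pre_ guarantees the indices exist (default never used)
  let p1 := PySem.List.pyGetD position 1 0
  let p0 := PySem.List.pyGetD position 0 0
  let c0 := PySem.List.pyGetD O 0 0
  let c1 := PySem.List.pyGetD O 1 0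
  let x : Int :=
    if p1 > c0 then (pvLoopDown p1 c0 0).2
    else if p1 < c0 then (pvLoopUp p1 c0 0).2 * (-1)
    else 0
  let y : Int :=
    if p0 > c1 then (pvLoopDown p0 c1 0).2
    else if p0 < c1 then (pvLoopUp p0 c1 0).2 * (-1)
    else 0
  [x, y]

-- ===== PORT B =====
def convertisseur_matrice_alt (Matrice : List Int) (position : List Int) : List Int :=
  let c := PySem.Int.floordiv (Matrice.length : Int) 2
  [PySem.List.pyGetD position 1 0 - c, PySem.List.pyGetD position 0 0 - c]

-- ===== PRECONDITION & SPEC =====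
-- Pre_: A reads position[0] and position[1]; it raises IndexError on shorter lists (B raises too).
def Pre_convertisseur_matrice (Matrice : List Int) (position : List Int) : Prop :=
  2 ≤ position.length
instance (Matrice : List Int) (position : List Int) : Decidable (Pre_convertisseur_matrice Matrice position) := by unfold Pre_convertisseur_matrice; infer_instance

def pvWitness_convertisseur_matrice : List Int × List Int := ([1, 2, 3], [0, 2])

def Spec_convertisseur_matrice (Matrice : List Int) (position : List Int) (out : List Int) : Prop := out = convertisseur_matrice_alt Matrice position
instance (Matrice : List Int) (position : List Int) (out : List Int) : Decidable (Spec_convertisseur_matrice Matrice position out) := by unfold Spec_convertisseur_matrice; infer_instance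

-- ===== CLAIM (what is proved, stated in full; the proofs are below) =====
def Claim_equal_convertisseur_matrice : Prop := ∀ (Matrice : List Int) (position : List Int), Dom_convertisseur_matrice Matrice position → Pre_convertisseur_matrice Matrice position → Spec_convertisseur_matrice Matrice position (convertisseur_matrice Matrice position)

-- ===== LEMMAS AND PROOFS =====

theorem pvLoopDown_snd (p c x : Int) (h : c ≤ p) : (pvLoopDown p c x).2 = x + (p - c) := by
  generalize hk : (p - c).toNat = k
  induction k generalizing p x with
  | zero =>
      rw [pvLoopDown, if_neg (by omega)]; omega
  | succ k ih =>
      rw [pvLoopDown, if_pos (by omega), ih (p - 1) (x + 1) (by omega) (by omega)]; omega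

theorem pvLoopUp_snd (p c x : Int) (h : p ≤ c) : (pvLoopUp p c x).2 = x + (c - p) := by
  generalize hk : (c - p).toNat = k
  induction k generalizing p x with
  | zero =>
      rw [pvLoopUp, if_neg (by omega)]; omega
  | succ k ih =>
      rw [pvLoopUp, if_pos (by omega), ih (p + 1) (x + 1) (by omega) (by omega)]; omega

-- ===== VERDICT (by name: the statement is the Claim_ definition above) =====
theorem convertisseur_matrice_spec : Claim_equal_convertisseur_matrice := by
  intro Matrice position _ _
  unfold Spec_convertisseur_matrice convertisseur_matrice convertisseur_matrice_alt
  simp only [PySem.List.pyGetD]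
  set c : Int := PySem.Int.floordiv (Matrice.length : Int) 2 with hc
  set p1 : Int := (PySem.List.pyGet? position 1).getD 0 with hp1
  set p0 : Int := (PySem.List.pyGet? position 0).getD 0 with hp0
  have hx : ∀ p : Int,
      (if p > c then (pvLoopDown p c 0).2
       else if p < c then (pvLoopUp p c 0).2 * (-1) else 0) = p - c := by
    intro p
    by_cases h1 : p > c
    · rw [if_pos h1, pvLoopDown_snd p c 0 (by omega)]; omega
    · rw [if_neg h1]
      by_cases h2 : p < c
      · rw [if_pos h2, pvLoopUp_snd p c 0 (by omega)]; omega
      · rw [if_neg h2]; omega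
  have h01 : ∀ i : Int, i = 0 ∨ i = 1 → (PySem.List.pyGet? [c, c] i).getD 0 = c := by
    rintro i (rfl | rfl) <;> simp [PySem.List.pyGet?, PySem.List.pyIdx?]
  rw [h01 0 (Or.inl rfl), h01 1 (Or.inr rfl), hx p1, hx p0]
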